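-- pv_equiv track=rewrite | github.com/tarlansoltanov/CodeWars | 6 KYU/Simple Encryption #1 - Alternating Split/Solution.py | decrypt_one
-- ===== SOURCE A (Python) =====
-- def decrypt_one(text):
--     mid=int(len(text)/2)
--     decry_one = text[0:mid]
--     decry_two = text[mid:]
--     s=""
--     for i in range(0,mid):
--         s += decry_two[i]+decry_one[i]
--     if len(text)%2!=0:
--         s += decry_two[mid]
--     return s
-- ===== SOURCE B (Python) =====
-- def decrypt_one(text):
--     mid = len(text) // 2
--     res = [''] * len(text)
--     res[::2] = text[mid:]
--     res[1::2] = text[:mid]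
--     return ''.join(res)
-- ===== Notes on version B (the rewrite author's own statement) =====
-- stated objective: idiomatic
-- what changed: Replaced the explicit index loop with repeated string concatenation and the odd-length branch by allocating the output list once and assigning the two halves via strided slice assignments res[::2]/res[1::2], joined at the end.
import Mathlib
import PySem

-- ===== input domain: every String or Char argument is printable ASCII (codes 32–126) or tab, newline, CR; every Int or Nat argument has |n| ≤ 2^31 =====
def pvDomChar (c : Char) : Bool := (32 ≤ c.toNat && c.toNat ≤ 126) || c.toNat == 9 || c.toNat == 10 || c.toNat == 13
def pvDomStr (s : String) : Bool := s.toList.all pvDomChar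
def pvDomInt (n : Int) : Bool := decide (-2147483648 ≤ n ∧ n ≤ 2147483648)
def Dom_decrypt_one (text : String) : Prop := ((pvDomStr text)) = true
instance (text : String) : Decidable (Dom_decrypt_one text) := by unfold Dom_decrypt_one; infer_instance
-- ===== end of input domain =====

-- B replaces A's index loop and odd-length branch by two strided-slice assignments (idiomatic, one pass).

-- ===== PORT A =====
-- literal port of A; indices in the loop (and the mid index in the odd branch) are
-- always in range, so getD never takes its default.
def decrypt_one (text : String) : String :=
  let tl := text.toList
  let mid := tl.length / 2                 -- int(len(text)/2)
  let decry_one := tl.take mid             -- text[0:mid]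
  let decry_two := tl.drop mid             -- text[mid:]
  let s := (List.range mid).foldl
    (fun s i => s ++ [decry_two.getD i ' ', decry_one.getD i ' ']) []
  String.ofList (if tl.length % 2 ≠ 0 then s ++ [decry_two.getD mid ' '] else s)

-- ===== PORT B =====
-- port of Source B: the strided slice assignments res[::2] = text[mid:] and
-- res[1::2] = text[:mid] mean: position i of res receives second[i/2] when i is
-- even and first[i/2] when i is odd (lengths always match, indices always in range).
def decrypt_one_alt (text : String) : String :=
  let tl := text.toList
  let mid := tl.length / 2
  let second := tl.drop mid
  let first := tl.take mid
  String.ofList ((List.range tl.length).map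
    (fun i => if i % 2 == 0 then second.getD (i / 2) ' ' else first.getD (i / 2) ' '))

-- ===== PRECONDITION & SPEC =====
def Spec_decrypt_one (text : String) (out : String) : Prop := out = decrypt_one_alt text
instance (text : String) (out : String) : Decidable (Spec_decrypt_one text out) := by unfold Spec_decrypt_one; infer_instance

-- ===== CLAIM (what is proved, stated in full; the proofs are below) =====
def Claim_equal_decrypt_one : Prop := ∀ (text : String), Dom_decrypt_one text → Spec_decrypt_one text (decrypt_one text)

-- ===== LEMMAS AND PROOFS =====

-- interleave: heads of b and a alternate, starting with b
def itl : List Char → List Char → List Char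
  | x :: xs, y :: ys => x :: y :: itl xs ys
  | xs, [] => xs
  | [], _ :: _ => []

def pairsOf (a b : List Char) : List Char :=
  (List.range a.length).flatMap (fun i => [b.getD i ' ', a.getD i ' '])

lemma pairsOf_cons (y x : Char) (ys xs : List Char) :
    pairsOf (y :: ys) (x :: xs) = x :: y :: pairsOf ys xs := by
  simp [pairsOf, List.range_succ_eq_map, List.flatMap_cons, List.flatMap_map]

lemma pairsOf_even (a b : List Char) (h : b.length = a.length) :
    pairsOf a b = itl b a := by
  induction a generalizing b with
  | nil => cases b with
    | nil => simp [pairsOf, itl]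
    | cons x xs => simp at h
  | cons y ys ih =>
    cases b with
    | nil => simp at h
    | cons x xs =>
      simp at h
      rw [pairsOf_cons, itl, ih xs h]

lemma pairsOf_odd (a b : List Char) (h : b.length = a.length + 1) :
    pairsOf a b ++ [b.getD a.length ' '] = itl b a := by
  induction a generalizing b with
  | nil => cases b with
    | nil => simp at h
    | cons x xs =>
      simp at h
      subst h
      simp [pairsOf, itl]
  | cons y ys ih =>
    cases b with
    | nil => simp at h
    | cons x xs =>
      simp at h
      rw [pairsOf_cons, itl]
      simp only [List.cons_append, List.length_cons]
      rw [show (x :: xs).getD (ys.length + 1) ' ' = xs.getD ys.length ' ' from rfl, ih xs h]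

lemma mapB_eq (a b : List Char) (h : b.length = a.length ∨ b.length = a.length + 1) :
    (List.range (a.length + b.length)).map
      (fun i => if i % 2 == 0 then b.getD (i / 2) ' ' else a.getD (i / 2) ' ') = itl b a := by
  induction a generalizing b with
  | nil =>
    cases b with
    | nil => simp [itl]
    | cons x xs =>
      have hx : xs = [] := by
        cases xs with
        | nil => rfl
        | cons z zs => exfalso; rcases h with h | h <;> simp at h
      subst hx
      simp [itl, List.range_succ]
  | cons y ys ih =>
    cases b with
    | nil => simp at h
    | cons x xs =>
      have h' : xs.length = ys.length ∨ xs.length = ys.length + 1 := by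
        simp at h; omega
      have hn : (y :: ys).length + (x :: xs).length = (ys.length + xs.length) + 1 + 1 := by
        simp; omega
      rw [hn, List.range_succ_eq_map, List.range_succ_eq_map, itl]
      simp only [List.map_cons, List.map_map]
      have h0 : ((0 : Nat) % 2 == 0) = true := rfl
      have h1 : (((0 : Nat) + 1) % 2 == 0) = false := rfl
      simp only [h0, h1, if_true]
      congr 1
      congr 1
      rw [← ih xs h']
      apply List.map_congr_left
      intro i _
      simp only [Function.comp]
      have e1 : (i + 1 + 1) % 2 = i % 2 := by omega
      have e2 : (i + 1 + 1) / 2 = i / 2 + 1 := by omega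
      rw [e1, e2]
      rfl

lemma main_lemma (l : List Char) :
    (let mid := l.length / 2
     let decry_one := l.take mid
     let decry_two := l.drop mid
     let s := (List.range mid).foldl
       (fun s i => s ++ [decry_two.getD i ' ', decry_one.getD i ' ']) ([] : List Char)
     if l.length % 2 ≠ 0 then s ++ [decry_two.getD mid ' '] else s) =
    (List.range l.length).map
      (fun i => if i % 2 == 0 then (l.drop (l.length / 2)).getD (i / 2) ' '
                else (l.take (l.length / 2)).getD (i / 2) ' ') := by
  simp only []
  set mid := l.length / 2 with hmid
  set a := l.take mid with ha
  set b := l.drop mid with hb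
  have hal : a.length = mid := by simp [ha, hmid]; omega
  have hbl : b.length = l.length - mid := by simp [hb]
  have hab : l.length = a.length + b.length := by omega
  rw [PySem.List.foldl_append_eq_flatMap, List.nil_append, ← hal, ← pairsOf]
  by_cases hodd : l.length % 2 = 0
  · have he : b.length = a.length := by omega
    rw [if_neg (by omega), hab, mapB_eq a b (Or.inl he), pairsOf_even a b he]
  · have he : b.length = a.length + 1 := by omega
    rw [if_pos (by omega), hab, mapB_eq a b (Or.inr he), pairsOf_odd a b he]

-- ===== VERDICT (by name: the statement is the Claim_ definition above) =====
theorem decrypt_one_spec : Claim_equal_decrypt_one := by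
  intro text _
  unfold Spec_decrypt_one decrypt_one decrypt_one_alt
  exact congrArg String.ofList (main_lemma text.toList)
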